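-- pv_equiv track=rewrite | github.com/i960107/algorithm | programmers/level2_n진수게임.py | solution_N_notation_game
-- ===== SOURCE A (Python) =====
-- def solution_N_notation_game(n: int, t: int, m: int, p: int) -> str:
--     arr = ""
--
--     def convert_notation(num: int, k: int) -> str:
--         nums = ['0', '1', '2', '3', '4', '5', '6', '7', '8', '9', 'A', 'B', 'C', 'D', 'E', 'F']
--         if num == 0:
--             return '0'
--         reverse = ''
--         while num != 0:
--             num, remainder = num // k, num % k
--             reverse += nums[remainder % k]
--         return reverse[::-1]
--
--     i = 0
--     while len(arr) <= p + m * (t - 1):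
--         arr += convert_notation(i, n)
--         i += 1
--
--     return ''.join([arr[i-1] for i in range(p, p + m * (t - 1) + 1, m)])
-- ===== SOURCE B (Python) =====
-- def solution_N_notation_game(n: int, t: int, m: int, p: int) -> str:
--     # Compute each sampled digit directly from its position in the infinite
--     # string "0" + base-n(1) + base-n(2) + ... instead of materialising it.
--     digits = "0123456789ABCDEF"
--
--     def digit_at(q: int) -> str:
--         if q == 0:
--             return "0"
--         q -= 1  # skip the leading "0"
--         d, start = 1, 1  # d-digit numbers: start..start*n-1, d*start*(n-1) chars
--         while q >= d * start * (n - 1):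
--             q -= d * start * (n - 1)
--             d += 1
--             start *= n
--         num = start + q // d
--         off = q % d
--         return digits[(num // n ** (d - 1 - off)) % n]
--
--     return "".join(digit_at(p - 1 + m * k) for k in range(t))
-- ===== Notes on version B (the rewrite author's own statement) =====
-- stated objective: faster
-- what changed: Instead of concatenating base-n representations of 0,1,2,... into one long string and then indexing it, B computes each of the t sampled digits directly: it peels off whole digit-length blocks (d-digit numbers occupy d*(n-1)*n^(d-1) characters) to locate the containing number and extracts that digit arithmetically; …
-- outside the precondition, e.g. on solution_N_notation_game(2, 1, 1, 0): A returns '0', B returns '1'; on solution_N_notation_game(17, 1, 1, 1): A returns '0', B returns '0'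
import Mathlib
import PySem

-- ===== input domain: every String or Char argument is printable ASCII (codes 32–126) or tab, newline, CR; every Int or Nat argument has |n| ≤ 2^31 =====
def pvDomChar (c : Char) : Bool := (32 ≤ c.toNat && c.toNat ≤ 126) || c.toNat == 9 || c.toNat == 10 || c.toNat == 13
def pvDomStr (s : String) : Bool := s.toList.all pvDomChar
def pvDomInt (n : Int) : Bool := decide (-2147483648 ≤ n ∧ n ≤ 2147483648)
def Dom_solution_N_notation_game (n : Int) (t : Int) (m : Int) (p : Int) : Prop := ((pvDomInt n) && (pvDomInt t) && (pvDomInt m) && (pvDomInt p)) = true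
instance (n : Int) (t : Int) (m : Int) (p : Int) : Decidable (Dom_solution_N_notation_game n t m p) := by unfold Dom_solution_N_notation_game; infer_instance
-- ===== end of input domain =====

-- B computes each sampled digit directly by block arithmetic on the infinite digit string
-- instead of building the whole concatenated string (intended to be faster: O(t*log) work).

-- ===== PORT A =====
-- the digit table `nums` inside convert_notation
def pvNums : List Char := ['0','1','2','3','4','5','6','7','8','9','A','B','C','D','E','F']

-- the `while num != 0` loop of convert_notation; fuel only makes the same steps total
-- (list index nums[...] out of range would raise in Python: `.getD '?'` is reached only outside Pre_)
def pvConvLoop : Nat → Int → Int → List Char → List Char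
  | 0, _, _, rev => rev
  | fuel+1, num, k, rev =>
    if num = 0 then rev
    else pvConvLoop fuel (PySem.Int.floordiv num k) k
      (rev ++ [(PySem.List.pyGet? pvNums (PySem.Int.mod (PySem.Int.mod num k) k)).getD '?'])

def pvConvert (num k : Int) : List Char :=
  if num = 0 then ['0'] else (pvConvLoop (num.toNat + 1) num k []).reverse

-- the `while len(arr) <= p + m * (t - 1)` loop; fuel target.toNat + 2 suffices on Pre_
def pvBuildLoop : Nat → Int → Int → List Char → Int → List Char
  | 0, _, _, arr, _ => arr
  | fuel+1, n, target, arr, i =>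
    if (arr.length : Int) ≤ target then pvBuildLoop fuel n target (arr ++ pvConvert i n) (i+1)
    else arr

def solution_N_notation_game (n : Int) (t : Int) (m : Int) (p : Int) : String :=
  let arr := pvBuildLoop ((p + m * (t - 1)).toNat + 2) n (p + m * (t - 1)) [] 0
  String.mk ((PySem.List.pyRange p (p + m * (t - 1) + 1) m).map
    (fun i => (PySem.List.pyGet? arr (i - 1)).getD '?'))

-- ===== PORT B =====
def pvDigits : List Char := ['0','1','2','3','4','5','6','7','8','9','A','B','C','D','E','F']

-- the `while q >= d * start * (n - 1)` loop of digit_at; fuel only makes the same steps total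
def pvPeelLoop : Nat → Int → Int → Int → Int → Int × Int × Int
  | 0, _, q, d, start => (q, d, start)
  | fuel+1, n, q, d, start =>
    if q ≥ d * start * (n - 1) then pvPeelLoop fuel n (q - d * start * (n - 1)) (d + 1) (start * n)
    else (q, d, start)

-- digit_at; Python's n ** (d - 1 - off) has a nonnegative exponent on Pre_, ported as ^ (…).toNat
def pvDigitAt (n : Int) (q : Int) : Char :=
  if q = 0 then '0'
  else
    let r := pvPeelLoop ((q - 1).toNat + 1) n (q - 1) 1 1
    let num := r.2.2 + PySem.Int.floordiv r.1 r.2.1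
    let off := PySem.Int.mod r.1 r.2.1
    (PySem.List.pyGet? pvDigits
      (PySem.Int.mod (PySem.Int.floordiv num (n ^ (r.2.1 - 1 - off).toNat)) n)).getD '?'

def solution_N_notation_game_alt (n : Int) (t : Int) (m : Int) (p : Int) : String :=
  String.mk ((PySem.List.pyRange 0 t 1).map (fun k => pvDigitAt n (p - 1 + m * k)))

-- ===== PRECONDITION & SPEC =====
-- Pre_ admits the problem's natural domain (base 2..16, t,m,p ≥ 1) plus the degenerate
-- inputs (t ≤ 0, sample range empty) on which A returns "" without work. It excludes
-- inputs where A diverges (n < 2 with work to do) or raises (m = 0, out-of-range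
-- indexing), non-positive p where A returns a value only through accidental
-- negative-index wraparound (arr[-1]), and bases n > 16, where A returns only for tiny
-- targets by the accident that the numbers 0..15 are single base-n digits there.
def Pre_solution_N_notation_game (n : Int) (t : Int) (m : Int) (p : Int) : Prop :=
  (2 ≤ n ∧ n ≤ 16 ∧ 1 ≤ t ∧ 1 ≤ m ∧ 1 ≤ p) ∨
  (t ≤ 0 ∧ m ≠ 0 ∧ p + m * (t - 1) < 0) ∨
  (t ≤ 0 ∧ m ≤ -1 ∧ 2 ≤ n ∧ n ≤ 16 ∧ 0 ≤ p + m * (t - 1))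
instance (n : Int) (t : Int) (m : Int) (p : Int) : Decidable (Pre_solution_N_notation_game n t m p) := by
  unfold Pre_solution_N_notation_game; infer_instance

def pvWitness_solution_N_notation_game : Int × Int × Int × Int := (2, 4, 2, 3)

def Spec_solution_N_notation_game (n : Int) (t : Int) (m : Int) (p : Int) (out : String) : Prop :=
  out = solution_N_notation_game_alt n t m p
instance (n : Int) (t : Int) (m : Int) (p : Int) (out : String) :
    Decidable (Spec_solution_N_notation_game n t m p out) := by
  unfold Spec_solution_N_notation_game; infer_instance

-- ===== CLAIM (what is proved, stated in full; the proofs are below) =====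
def Claim_equal_solution_N_notation_game : Prop :=
  ∀ (n : Int) (t : Int) (m : Int) (p : Int), Dom_solution_N_notation_game n t m p →
    Pre_solution_N_notation_game n t m p →
    Spec_solution_N_notation_game n t m p (solution_N_notation_game n t m p)

-- ===== LEMMAS AND PROOFS =====

-- character table lookup, proof-side
def chrT (r : Nat) : Char := pvNums.getD r '?'

-- base-b representation, proof-side (big-endian)
def reprN (b j : Nat) : List Char :=
  if j = 0 then ['0'] else ((Nat.digits b j).map chrT).reverse

-- the concatenation A builds, as a function of how many numbers went in
def sA (n : Int) (I : Nat) : List Char := (List.range I).flatMap (fun j : Nat => pvConvert (j : Int) n)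

-- block of all d = e+1 digit numbers
def blockB (b e : Nat) : List Char := (List.range' (b ^ e) ((b - 1) * b ^ e)).flatMap (reprN b)
def SZ (b e : Nat) : Nat := (e + 1) * ((b - 1) * b ^ e)
def cblocks (b : Nat) : Nat → List Char
  | 0 => []
  | D+1 => cblocks b D ++ blockB b D

theorem convLoop_eq (n : Int) (hn2 : 2 ≤ n) (hn16 : n ≤ 16) :
    ∀ (j : Nat) (fuel : Nat) (acc : List Char), j < fuel →
      pvConvLoop fuel (j : Int) n acc = acc ++ (Nat.digits n.toNat j).map chrT := by
  intro j
  induction j using Nat.strong_induction_on with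
  | _ j ih =>
    intro fuel acc hfuel
    match fuel, hfuel with
    | fuel+1, _ =>
      by_cases hj : j = 0
      · subst hj; simp [pvConvLoop]
      · have hb2 : 2 ≤ n.toNat := by omega
        have hbn : ((n.toNat : Nat) : Int) = n := Int.toNat_of_nonneg (by omega)
        have hmod : j % n.toNat % n.toNat = j % n.toNat :=
          Nat.mod_eq_of_lt (Nat.mod_lt _ (by omega))
        have hlt : j / n.toNat < j := Nat.div_lt_self (Nat.pos_of_ne_zero hj) (by omega)
        rw [pvConvLoop, if_neg (by exact_mod_cast hj)]
        rw [← hbn, PySem.Int.floordiv_natCast, PySem.Int.mod_natCast, PySem.Int.mod_natCast,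
          hmod, PySem.List.pyGet?_natCast]
        rw [hbn, ih (j / n.toNat) hlt fuel _ (by omega)]
        rw [Nat.digits_def' (by omega : 1 < n.toNat) (Nat.pos_of_ne_zero hj)]
        simp [chrT, List.getD_eq_getElem?_getD]

theorem conv_eq (n : Int) (hn2 : 2 ≤ n) (hn16 : n ≤ 16) (j : Nat) :
    pvConvert (j : Int) n = reprN n.toNat j := by
  by_cases hj : j = 0
  · subst hj; simp [pvConvert, reprN]
  · rw [pvConvert, if_neg (by exact_mod_cast hj), reprN, if_neg hj]
    rw [show ((j : Int)).toNat = j from rfl, convLoop_eq n hn2 hn16 j (j+1) [] (by omega)]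
    simp

theorem reprN_len_pos (b j : Nat) : 1 ≤ (reprN b j).length := by
  rw [reprN]
  split_ifs with h
  · simp
  · simp only [List.length_reverse, List.length_map]
    have hne : Nat.digits b j ≠ [] := Nat.digits_ne_nil_iff_ne_zero.mpr h
    cases hdg : Nat.digits b j with
    | nil => exact absurd hdg hne
    | cons a l => simp

theorem reprN_len (b j e : Nat) (hb : 2 ≤ b) (h1 : b ^ e ≤ j) (h2 : j < b ^ (e + 1)) :
    (reprN b j).length = e + 1 := by
  have hj : j ≠ 0 := by have := Nat.one_le_pow e b (by omega); omega
  rw [reprN, if_neg hj]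
  simp only [List.length_reverse, List.length_map]
  rw [Nat.digits_len b j (by omega) hj, Nat.log_eq_of_pow_le_of_lt_pow h1 h2]

theorem dig_get (b : Nat) (hb : 2 ≤ b) :
    ∀ (i j : Nat), 0 < j → i < (Nat.digits b j).length →
      (Nat.digits b j)[i]? = some (j / b ^ i % b) := by
  intro i
  induction i with
  | zero =>
    intro j hj _
    rw [Nat.digits_def' (by omega : 1 < b) hj]
    simp
  | succ i ih =>
    intro j hj hlen
    rw [Nat.digits_def' (by omega : 1 < b) hj] at hlen ⊢
    simp only [List.getElem?_cons_succ]
    have hdiv : 0 < j / b := by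
      rcases Nat.eq_zero_or_pos (j / b) with h0 | h
      · rw [h0] at hlen; simp at hlen
      · exact h
    rw [ih (j / b) hdiv (by simpa using hlen)]
    rw [Nat.div_div_eq_div_mul, ← pow_succ']

theorem reprN_get (b j e off : Nat) (hb : 2 ≤ b) (h1 : b ^ e ≤ j) (h2 : j < b ^ (e + 1))
    (hoff : off ≤ e) : (reprN b j)[off]? = some (chrT (j / b ^ (e - off) % b)) := by
  have hj : j ≠ 0 := by have := Nat.one_le_pow e b (by omega); omega
  have hdl : (Nat.digits b j).length = e + 1 := by
    rw [Nat.digits_len b j (by omega) hj, Nat.log_eq_of_pow_le_of_lt_pow h1 h2]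
  rw [reprN, if_neg hj]
  rw [List.getElem?_reverse (by simp [hdl]; omega)]
  simp only [List.length_map, List.getElem?_map, hdl]
  rw [show e + 1 - 1 - off = e - off by omega]
  rw [dig_get b hb (e - off) j (Nat.pos_of_ne_zero hj) (by omega)]
  rfl

theorem pow_split (b e : Nat) (hb : 2 ≤ b) : b ^ e + (b - 1) * b ^ e = b ^ (e + 1) := by
  have h1 : (b - 1) * b ^ e = b * b ^ e - 1 * b ^ e := Nat.sub_mul b 1 (b ^ e)
  have h2 : b ^ e ≤ b * b ^ e := Nat.le_mul_of_pos_left _ (by omega)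
  rw [pow_succ, mul_comm (b ^ e) b]
  omega

theorem chunk (b e : Nat) :
    ∀ (c s r : Nat), r < c * (e + 1) → (∀ j, s ≤ j → j < s + c → (reprN b j).length = e + 1) →
      ((List.range' s c).flatMap (reprN b))[r]? =
        (reprN b (s + r / (e + 1)))[r % (e + 1)]? := by
  intro c
  induction c with
  | zero => intro s r hr _; omega
  | succ c ih =>
    intro s r hr hlen
    rw [List.range'_succ, List.flatMap_cons]
    have hs : (reprN b s).length = e + 1 := hlen s le_rfl (by omega)
    by_cases hcase : r < e + 1
    · rw [List.getElem?_append_left (by omega)]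
      rw [Nat.div_eq_of_lt hcase, Nat.mod_eq_of_lt hcase, Nat.add_zero]
    · rw [List.getElem?_append_right (by omega), hs]
      rw [ih (s + 1) (r - (e + 1)) (by rw [Nat.succ_mul] at hr; omega)
        (fun j hj1 hj2 => hlen j (by omega) (by omega))]
      obtain ⟨r', rfl⟩ : ∃ r', r = r' + (e + 1) := ⟨r - (e + 1), by omega⟩
      rw [Nat.add_sub_cancel, Nat.add_div_right _ (by omega), Nat.add_mod_right]
      rw [show s + 1 + r' / (e + 1) = s + (r' / (e + 1) + 1) by omega]

theorem blockB_mem_len (b e j : Nat) (hb : 2 ≤ b) (h1 : b ^ e ≤ j)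
    (h2 : j < b ^ e + (b - 1) * b ^ e) : (reprN b j).length = e + 1 := by
  refine reprN_len b j e hb h1 ?_
  rw [← pow_split b e hb]; omega

theorem blockB_len (b e : Nat) (hb : 2 ≤ b) : (blockB b e).length = SZ b e := by
  rw [blockB, List.length_flatMap]
  rw [List.map_congr_left (g := fun _ => e + 1) (fun j hj => by
    rw [List.mem_range'_1] at hj
    exact blockB_mem_len b e j hb hj.1 hj.2)]
  simp [List.map_const', SZ, mul_comm]

theorem blockB_get (b e r : Nat) (hb : 2 ≤ b) (hr : r < SZ b e) :
    (blockB b e)[r]? = some (chrT ((b ^ e + r / (e + 1)) / b ^ (e - r % (e + 1)) % b)) := by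
  rw [blockB, chunk b e ((b - 1) * b ^ e) (b ^ e) r (by rw [SZ, mul_comm] at hr; exact hr)
    (fun j hj1 hj2 => blockB_mem_len b e j hb hj1 hj2)]
  have hdiv : r / (e + 1) < (b - 1) * b ^ e := by
    rw [Nat.div_lt_iff_lt_mul (by omega)]
    rw [SZ, mul_comm] at hr; exact hr
  have hoff := Nat.mod_lt r (show 0 < e + 1 by omega)
  exact reprN_get b (b ^ e + r / (e + 1)) e (r % (e + 1)) hb (Nat.le_add_right _ _)
    (by rw [← pow_split b e hb]; omega) (by omega)

theorem sA_repr (n : Int) (hn2 : 2 ≤ n) (hn16 : n ≤ 16) (I : Nat) :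
    sA n I = (List.range I).flatMap (reprN n.toNat) := by
  rw [sA, show (fun j : Nat => pvConvert (j : Int) n) = reprN n.toNat from
    funext (conv_eq n hn2 hn16)]

theorem tail_eq (b : Nat) (hb : 2 ≤ b) :
    ∀ D, (List.range' 1 (b ^ D - 1)).flatMap (reprN b) = cblocks b D := by
  intro D
  induction D with
  | zero => simp [cblocks]
  | succ D ih =>
    have hp := pow_split b D hb
    have h1 : 1 ≤ b ^ D := Nat.one_le_pow D b (by omega)
    have hsplit : b ^ (D + 1) - 1 = (b ^ D - 1) + (b - 1) * b ^ D := by omega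
    rw [hsplit, ← List.range'_append, List.flatMap_append, ih]
    rw [show 1 + 1 * (b ^ D - 1) = b ^ D by omega]
    rfl

theorem sA_blocks (n : Int) (hn2 : 2 ≤ n) (hn16 : n ≤ 16) (D : Nat) :
    sA n (n.toNat ^ D) = '0' :: cblocks n.toNat D := by
  have hb : 2 ≤ n.toNat := by omega
  have h1 : 1 ≤ n.toNat ^ D := Nat.one_le_pow D _ (by omega)
  rw [sA_repr n hn2 hn16, List.range_eq_range']
  rw [show n.toNat ^ D = 1 + (n.toNat ^ D - 1) by omega, ← List.range'_append,
    List.flatMap_append]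
  rw [show (0 : Nat) + 1 * 1 = 1 by omega]
  rw [tail_eq n.toNat hb D]
  rfl

theorem sA_prefix (n : Int) (I J : Nat) (h : I ≤ J) : sA n I <+: sA n J := by
  refine ⟨(List.range' I (J - I)).flatMap (fun j : Nat => pvConvert (j : Int) n), ?_⟩
  rw [sA, sA, ← List.flatMap_append, List.range_eq_range', List.range_eq_range']
  rw [show List.range' 0 I ++ List.range' I (J - I) = List.range' 0 J by
    have := List.range'_append (s := 0) (m := I) (n := J - I) (step := 1)
    simp at this; rw [this]; congr 1; omega]

theorem cblocks_len_succ (b D : Nat) (hb : 2 ≤ b) :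
    (cblocks b (D + 1)).length = (cblocks b D).length + SZ b D := by
  simp [cblocks, blockB_len b D hb]

theorem SZ_pos (b e : Nat) (hb : 2 ≤ b) : 1 ≤ SZ b e := by
  have h1 : 1 ≤ b ^ e := Nat.one_le_pow e b (by omega)
  rw [SZ]
  exact Nat.mul_pos (by omega) (Nat.mul_pos (by omega) (pow_pos (by omega) e))

theorem peel_correct (n : Int) (hn2 : 2 ≤ n) :
    ∀ (fuel qN dN : Nat), qN < fuel →
      ∃ df qf, dN ≤ df ∧ qf < SZ n.toNat df ∧
        qN + (cblocks n.toNat dN).length = qf + (cblocks n.toNat df).length ∧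
        pvPeelLoop fuel n (qN : Int) ((dN : Int) + 1) ((n.toNat ^ dN : Nat) : Int) =
          ((qf : Int), (df : Int) + 1, ((n.toNat ^ df : Nat) : Int)) := by
  intro fuel
  induction fuel with
  | zero => intro qN dN h; omega
  | succ fuel ih =>
    intro qN dN hfuel
    have hb : 2 ≤ n.toNat := by omega
    have hbn : ((n.toNat : Nat) : Int) = n := Int.toNat_of_nonneg (by omega)
    have hSZ : ((dN : Int) + 1) * ((n.toNat ^ dN : Nat) : Int) * (n - 1) =
        ((SZ n.toNat dN : Nat) : Int) := by
      rw [SZ]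
      push_cast [Nat.cast_sub (show 1 ≤ n.toNat by omega)]
      rw [hbn]; ring
    rw [pvPeelLoop]
    split_ifs with hcond
    · have hge : SZ n.toNat dN ≤ qN := by
        rw [hSZ] at hcond; exact_mod_cast hcond
      have hpos := SZ_pos n.toNat dN hb
      obtain ⟨df, qf, h1, h2, h3, h4⟩ := ih (qN - SZ n.toNat dN) (dN + 1) (by omega)
      refine ⟨df, qf, by omega, h2, ?_, ?_⟩
      · have hlen := cblocks_len_succ n.toNat dN hb
        omega
      · rw [hSZ, show (qN : Int) - ((SZ n.toNat dN : Nat) : Int) =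
            ((qN - SZ n.toNat dN : Nat) : Int) from (Nat.cast_sub hge).symm]
        rw [show ((dN : Int) + 1) + 1 = ((dN + 1 : Nat) : Int) + 1 by push_cast; ring]
        rw [show ((n.toNat ^ dN : Nat) : Int) * n = ((n.toNat ^ (dN + 1) : Nat) : Int) by
          push_cast; rw [hbn]; ring]
        exact h4
    · refine ⟨dN, qN, le_rfl, ?_, rfl, rfl⟩
      rw [hSZ] at hcond
      have : ¬ ((SZ n.toNat dN : Nat) : Int) ≤ (qN : Int) := hcond
      omega

theorem prefix_getElem? {l1 l2 : List Char} (h : l1 <+: l2) {q : Nat}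
    (hq : q < l1.length) : l2[q]? = l1[q]? := by
  obtain ⟨t, rfl⟩ := h
  exact List.getElem?_append_left hq

theorem digitAt_eval (b : Nat) (qN df qf : Nat) (hoff : qf % (df + 1) ≤ df)
    (h4 : pvPeelLoop (qN + 1) ((b : Nat) : Int) (qN : Int) 1 1 =
      ((qf : Int), (df : Int) + 1, ((b ^ df : Nat) : Int))) :
    pvDigitAt ((b : Nat) : Int) ((qN + 1 : Nat) : Int) =
      chrT ((b ^ df + qf / (df + 1)) / b ^ (df - qf % (df + 1)) % b) := by
  rw [pvDigitAt, if_neg (by exact_mod_cast Nat.succ_ne_zero qN)]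
  rw [show ((qN + 1 : Nat) : Int) - 1 = ((qN : Nat) : Int) by push_cast; ring]
  rw [Int.toNat_natCast, h4]
  simp only
  rw [show ((df : Int) + 1) = ((df + 1 : Nat) : Int) by push_cast; ring]
  rw [PySem.Int.floordiv_natCast, PySem.Int.mod_natCast]
  rw [show ((b ^ df : Nat) : Int) + ((qf / (df + 1) : Nat) : Int) =
    ((b ^ df + qf / (df + 1) : Nat) : Int) by push_cast; ring]
  rw [show ((df + 1 : Nat) : Int) - 1 - ((qf % (df + 1) : Nat) : Int) =
    ((df - qf % (df + 1) : Nat) : Int) by omega]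
  rw [Int.toNat_natCast]
  rw [show ((b : Nat) : Int) ^ (df - qf % (df + 1)) =
    ((b ^ (df - qf % (df + 1)) : Nat) : Int) by push_cast; ring]
  rw [PySem.Int.floordiv_natCast, PySem.Int.mod_natCast, PySem.List.pyGet?_natCast]
  simp [chrT, List.getD_eq_getElem?_getD, pvDigits, pvNums]

theorem main_get (n : Int) (hn2 : 2 ≤ n) (hn16 : n ≤ 16) (q I : Nat)
    (hq : q < (sA n I).length) : (sA n I)[q]? = some (pvDigitAt n (q : Int)) := by
  have hb : 2 ≤ n.toNat := by omega
  have hbn : ((n.toNat : Nat) : Int) = n := Int.toNat_of_nonneg (by omega)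
  cases q with
  | zero =>
    have hI : 1 ≤ I := by
      by_contra h
      have : I = 0 := by omega
      subst this
      simp [sA] at hq
    have h1 : sA n 1 = ['0'] := by
      simp [sA_repr n hn2 hn16, reprN]
    have hpre := sA_prefix n 1 I hI
    rw [prefix_getElem? hpre (by simp [h1]), h1]
    simp [pvDigitAt]
  | succ qN =>
    obtain ⟨df, qf, _, h2, h3, h4⟩ := peel_correct n hn2 (qN + 1) qN 0 (by omega)
    have hcb0 : (cblocks n.toNat 0).length = 0 := rfl
    have h3' : qN = qf + (cblocks n.toNat df).length := by omega
    have h4' : pvPeelLoop (qN + 1) n (qN : Int) 1 1 =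
        ((qf : Int), (df : Int) + 1, ((n.toNat ^ df : Nat) : Int)) := by
      simpa only [Nat.cast_zero, zero_add, pow_zero, Nat.cast_one] using h4
    have h4b : pvPeelLoop (qN + 1) ((n.toNat : Nat) : Int) (qN : Int) 1 1 =
        ((qf : Int), (df : Int) + 1, ((n.toNat ^ df : Nat) : Int)) := by
      rw [hbn]; exact h4'
    have hoff : qf % (df + 1) ≤ df := by
      have := Nat.mod_lt qf (show 0 < df + 1 by omega)
      omega
    -- evaluate the B side
    have hRHS0 := digitAt_eval n.toNat qN df qf hoff h4b
    have hRHS : pvDigitAt n ((qN + 1 : Nat) : Int) =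
        chrT ((n.toNat ^ df + qf / (df + 1)) / n.toNat ^ (df - qf % (df + 1)) % n.toNat) := by
      rw [← hbn]; exact hRHS0
    rw [hRHS]
    -- evaluate the A side
    have hlenB : (cblocks n.toNat (df + 1)).length =
        (cblocks n.toNat df).length + SZ n.toNat df := cblocks_len_succ n.toNat df hb
    have hlen2 : qN + 1 < (sA n (n.toNat ^ (df + 1))).length := by
      rw [sA_blocks n hn2 hn16 (df + 1)]
      simp only [List.length_cons]
      omega
    have hJ1 := prefix_getElem? (sA_prefix n I (max I (n.toNat ^ (df + 1))) (le_max_left _ _)) hq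
    have hJ2 := prefix_getElem?
      (sA_prefix n (n.toNat ^ (df + 1)) (max I (n.toNat ^ (df + 1))) (le_max_right _ _)) hlen2
    rw [← hJ1, hJ2, sA_blocks n hn2 hn16 (df + 1), List.getElem?_cons_succ]
    show (cblocks n.toNat df ++ blockB n.toNat df)[qN]? = _
    rw [h3', Nat.add_comm qf, List.getElem?_append_right (Nat.le_add_right _ _),
      Nat.add_sub_cancel_left]
    exact blockB_get n.toNat df qf hb h2

theorem conv_len_pos (n : Int) (hn2 : 2 ≤ n) (hn16 : n ≤ 16) (i : Nat) :
    1 ≤ (pvConvert (i : Int) n).length := by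
  rw [conv_eq n hn2 hn16]; exact reprN_len_pos n.toNat i

theorem sA_succ (n : Int) (i : Nat) :
    sA n (i + 1) = sA n i ++ pvConvert (i : Int) n := by
  rw [sA, sA, List.range_succ, List.flatMap_append]
  simp

theorem buildLoop_spec (n : Int) (hn2 : 2 ≤ n) (hn16 : n ≤ 16) (target : Int) :
    ∀ (fuel i : Nat), target.toNat + 2 ≤ fuel + (sA n i).length →
      ∃ I, pvBuildLoop fuel n target (sA n i) (i : Int) = sA n I ∧
        target < ((sA n I).length : Int) := by
  intro fuel
  induction fuel with
  | zero =>
    intro i h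
    rw [pvBuildLoop]
    exact ⟨i, rfl, by have := Int.self_le_toNat target; omega⟩
  | succ fuel ih =>
    intro i h
    rw [pvBuildLoop]
    split_ifs with hc
    · have hlen1 : (sA n i).length + 1 ≤ (sA n (i + 1)).length := by
        rw [sA_succ]
        have := conv_len_pos n hn2 hn16 i
        simp only [List.length_append]
        omega
      obtain ⟨I, hI, hL⟩ := ih (i + 1) (by omega)
      refine ⟨I, ?_, hL⟩
      rw [show ((i + 1 : Nat) : Int) = ((i : Int) + 1) by push_cast; ring, sA_succ n i] at hI
      exact hI
    · exact ⟨i, rfl, by omega⟩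

theorem emptyA (n t m p : Int) (ht0 : t ≤ 0) (hm0 : m ≠ 0) :
    PySem.List.pyRange p (p + m * (t - 1) + 1) m = [] := by
  rcases lt_or_gt_of_ne hm0 with hneg | hpos
  · have h2 : ¬ (p + m * (t - 1) + 1 < p) := by
      nlinarith [mul_pos (show (0:Int) < -m by omega) (show (0:Int) < 1 - t by omega)]
    simp [PySem.List.pyRange, hm0, show ¬ (0 < m) by omega, h2]
  · have h1 : m * (t - 1) ≤ 1 * (t - 1) := mul_le_mul_of_nonpos_right (by omega) (by omega)
    rw [PySem.List.pyRange_of_pos _ _ hpos, if_neg (by omega)]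
    simp

-- ===== VERDICT (by name: the statement is the Claim_ definition above) =====
theorem solution_N_notation_game_spec : Claim_equal_solution_N_notation_game := by
  intro n t m p _ hpre
  show solution_N_notation_game n t m p = solution_N_notation_game_alt n t m p
  rcases hpre with ⟨hn2, hn16, ht, hm, hp⟩ | ⟨ht0, hm0, htar⟩ | ⟨ht0, hm1, hn2, hn16, htar⟩
  case inr.inl =>
    rw [solution_N_notation_game, solution_N_notation_game_alt,
      emptyA n t m p ht0 hm0, PySem.List.pyRange_one_eq_nil (by omega)]
    rfl
  case inr.inr =>
    rw [solution_N_notation_game, solution_N_notation_game_alt,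
      emptyA n t m p ht0 (by omega), PySem.List.pyRange_one_eq_nil (by omega)]
    rfl
  rw [solution_N_notation_game, solution_N_notation_game_alt]
  have hmt : 0 ≤ m * (t - 1) := mul_nonneg (by omega) (by omega)
  obtain ⟨I, hI, hL⟩ := buildLoop_spec n hn2 hn16 (p + m * (t - 1))
    ((p + m * (t - 1)).toNat + 2) 0 (by simp [sA])
  have hI' : pvBuildLoop ((p + m * (t - 1)).toNat + 2) n (p + m * (t - 1)) [] 0 = sA n I := hI
  rw [hI']
  congr 1
  rw [PySem.List.pyRange_of_pos _ _ (show (0:Int) < m by omega),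
    PySem.List.pyRange_of_pos _ _ (show (0:Int) < 1 by omega)]
  rw [if_pos (show p < p + m * (t - 1) + 1 by omega), if_pos (show (0:Int) < t by omega)]
  rw [show p + m * (t - 1) + 1 - p + m - 1 = m * t by ring,
    Int.mul_ediv_cancel_left t (show m ≠ 0 by omega)]
  norm_num
  intro k hkt
  have hq0 : 0 ≤ p - 1 + m * (k : Int) := by
    have := mul_nonneg (show (0:Int) ≤ m by omega) (show (0:Int) ≤ (k : Int) by positivity)
    omega
  have hqlt : p - 1 + m * (k : Int) < ((sA n I).length : Int) := by
    have h2 : m * (k : Int) ≤ m * (t - 1) :=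
      mul_le_mul_of_nonneg_left (by omega) (by omega)
    omega
  have harg : p + m * (k : Int) - 1 = p - 1 + m * (k : Int) := by ring
  rw [harg, PySem.List.pyGet?_of_nonneg _ hq0]
  have hqnat : (((p - 1 + m * (k : Int)).toNat : Nat) : Int) = p - 1 + m * (k : Int) :=
    Int.toNat_of_nonneg hq0
  rw [main_get n hn2 hn16 (p - 1 + m * (k : Int)).toNat I (by omega)]
  rw [hqnat, Option.getD_some]
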